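-- pv_equiv track=rewrite | github.com/Skooogi/ccsds-122.0-B-2 | python/code.py | select_coding
-- ===== SOURCE A (Python) =====
-- def select_coding(delta, J, N):
--
--     if(64*delta > 23*J*pow(2, N)):
--         return -1
--     elif(207*J > 128*delta):
--         return 0
--     elif(J*pow(2,N+5) <= 128*delta + 49*J):
--         return N-2
--     else:
--         k = 1
--         while(J*pow(2,k+7) <= 128*delta + 49):
--             k += 1
--         return k
-- ===== SOURCE B (Python) =====
-- def select_coding(delta, J, N):
--     if 64*delta > 23*J*pow(2, N):
--         return -1
--     if 207*J > 128*delta: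
--         return 0
--     if J*pow(2, N+5) <= 128*delta + 49*J:
--         return N-2
--     T = 128*delta + 49
--     q = max(T, 0) // J
--     return max(8, q.bit_length()) - 7
-- ===== Notes on version B (the rewrite author's own statement) =====
-- stated objective: simpler
-- what changed: A's final while loop that searches the coding exponent by repeated doubling is replaced by a closed-form computation: return max(8, ((128*delta+49)//J).bit_length()) - 7; the three leading threshold branches are unchanged.
-- outside the precondition, e.g. on select_coding(0, 1, -2000): A returns 0, B returns 0; on select_coding(-1, -1, 0): A does not finish within the time limit, B returns 1
import Mathlib
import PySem

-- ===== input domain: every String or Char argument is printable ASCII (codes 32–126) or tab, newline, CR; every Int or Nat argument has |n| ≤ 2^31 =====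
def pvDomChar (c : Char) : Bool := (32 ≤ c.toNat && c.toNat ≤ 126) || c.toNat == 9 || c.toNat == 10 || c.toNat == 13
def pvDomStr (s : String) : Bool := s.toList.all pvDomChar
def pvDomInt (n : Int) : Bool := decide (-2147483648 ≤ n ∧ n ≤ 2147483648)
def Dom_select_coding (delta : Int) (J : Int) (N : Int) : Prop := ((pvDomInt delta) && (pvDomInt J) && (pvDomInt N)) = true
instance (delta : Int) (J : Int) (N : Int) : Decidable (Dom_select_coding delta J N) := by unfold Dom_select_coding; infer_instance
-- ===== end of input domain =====

-- B replaces A's while-loop search by a closed-form bit_length computation (objective: simpler).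

-- ===== PORT A =====
-- pow(2, e) clamped to nonnegative exponents; the two comparisons against pow(2, N)/pow(2, N+5)
-- are ported by scaling BOTH sides with pyPow2, which is exact for N ≥ -1000 (Pre_): there
-- Python's float pow(2, N) and its products with |int| ≤ 2^36 are exact doubles, so the float
-- comparison equals the integer comparison scaled by 2^(-N) (resp. 2^(-(N+5))).
def pyPow2 (e : Int) : Int := 2 ^ e.toNat

-- A's while loop; fuel only makes it total (under Pre_ and Dom the loop provably
-- stops well within 64 iterations, so the fuel is never exhausted there).
def selLoop (delta J : Int) : Nat → Int → Int
  | 0, k => k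
  | fuel+1, k => if J * pyPow2 (k+7) ≤ 128*delta + 49 then selLoop delta J fuel (k+1) else k

def select_coding (delta : Int) (J : Int) (N : Int) : Int :=
  if 64*delta*pyPow2 (-N) > 23*J*pyPow2 N then -1
  else if 207*J > 128*delta then 0
  else if J*pyPow2 (N+5) ≤ (128*delta + 49*J)*pyPow2 (-(N+5)) then N-2
  else selLoop delta J 64 1

-- ===== PORT B =====
def select_coding_alt (delta : Int) (J : Int) (N : Int) : Int :=
  if 64*delta*pyPow2 (-N) > 23*J*pyPow2 N then -1
  else if 207*J > 128*delta then 0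
  else if J*pyPow2 (N+5) ≤ (128*delta + 49*J)*pyPow2 (-(N+5)) then N-2
  else
    let T := 128*delta + 49
    let q := PySem.Int.floordiv (max T 0) J
    ((max 8 (PySem.Int.bitLength q) : Nat) : Int) - 7

-- ===== PRECONDITION & SPEC =====
-- Pre_ excludes N < -1000, where Python evaluates pow(2, N) in floating point with underflow
-- (outside the int convention, though A still returns there), and inputs on which all three
-- branches fail with J ≤ 0, where A's while loop never terminates.
def Pre_select_coding (delta : Int) (J : Int) (N : Int) : Prop :=
  -1000 ≤ N ∧ (1 ≤ J ∨ 64*delta*pyPow2 (-N) > 23*J*pyPow2 N ∨ 207*J > 128*delta ∨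
               J*pyPow2 (N+5) ≤ (128*delta + 49*J)*pyPow2 (-(N+5)))
instance (delta : Int) (J : Int) (N : Int) : Decidable (Pre_select_coding delta J N) := by
  unfold Pre_select_coding; infer_instance

def pvWitness_select_coding : Int × Int × Int := (3, 1, 2)

def Spec_select_coding (delta : Int) (J : Int) (N : Int) (out : Int) : Prop := out = select_coding_alt delta J N
instance (delta : Int) (J : Int) (N : Int) (out : Int) : Decidable (Spec_select_coding delta J N out) := by unfold Spec_select_coding; infer_instance

-- ===== CLAIM (what is proved, stated in full; the proofs are below) =====
def Claim_equal_select_coding : Prop := ∀ (delta : Int) (J : Int) (N : Int), Dom_select_coding delta J N → Pre_select_coding delta J N → Spec_select_coding delta J N (select_coding delta J N)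

-- ===== LEMMAS AND PROOFS =====

-- Python's bit_length characterised on nonnegative integers.
lemma bitLength_le_iff (q : Int) (hq : 0 ≤ q) (e : Nat) :
    PySem.Int.bitLength q ≤ e ↔ q < 2^e := by
  have hab : (q.natAbs : Int) = q := Int.natAbs_of_nonneg hq
  constructor
  · intro h
    have h1 := PySem.Int.lt_two_pow_bitLength q
    have h2 : (2:Nat)^(PySem.Int.bitLength q) ≤ 2^e := Nat.pow_le_pow_right (by norm_num) h
    have h3 : q.natAbs < 2^e := lt_of_lt_of_le h1 h2
    calc q = (q.natAbs : Int) := hab.symm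
      _ < ((2^e : Nat) : Int) := by exact_mod_cast h3
      _ = 2^e := by push_cast; ring
  · intro h
    by_contra hlt
    have hlt' : e < PySem.Int.bitLength q := by omega
    have hne : q ≠ 0 := by
      intro h0; rw [h0, PySem.Int.bitLength_zero] at hlt'; omega
    have h1 := PySem.Int.two_pow_bitLength_le q hne
    have h2 : q.natAbs < 2^e := by
      have : (q.natAbs : Int) < ((2^e : Nat) : Int) := by
        rw [hab]; calc q < 2^e := h
          _ = ((2^e : Nat) : Int) := by push_cast; ring
      exact_mod_cast this
    have h3 : (2:Nat)^(PySem.Int.bitLength q - 1) < 2^e := lt_of_le_of_lt h1 h2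
    have := (Nat.pow_lt_pow_iff_right (by norm_num : 1 < 2)).mp h3
    omega

-- A's loop returns max k (s - 7) when the loop guard is exactly "k + 7 < s".
lemma selLoop_eq (delta J : Int) (s : Nat)
    (hc : ∀ k : Int, 1 ≤ k → (J * pyPow2 (k+7) ≤ 128*delta + 49 ↔ k + 7 < (s:Int))) :
    ∀ (fuel : Nat) (k : Int), 1 ≤ k → (s:Int) - 7 - k ≤ fuel →
      selLoop delta J fuel k = max k ((s:Int) - 7) := by
  intro fuel
  induction fuel with
  | zero =>
    intro k hk hb
    simp only [selLoop]
    omega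
  | succ n ih =>
    intro k hk hb
    simp only [selLoop]
    split_ifs with h
    · have hk7 : k + 7 < (s:Int) := (hc k hk).mp h
      rw [ih (k+1) (by omega) (by omega)]
      omega
    · have hk7 : ¬ (k + 7 < (s:Int)) := fun hx => h ((hc k hk).mpr hx)
      omega

-- ===== VERDICT (by name: the statement is the Claim_ definition above) =====
theorem select_coding_spec : Claim_equal_select_coding := by
  intro delta J N hDom hPre
  unfold Spec_select_coding select_coding select_coding_alt
  split_ifs with h1 h2 h3
  · rfl
  · rfl
  · rfl
  -- loop case: all three branches failed, so Pre_ forces 1 ≤ J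
  obtain ⟨hN, hJ⟩ := hPre
  have hJ1 : 1 ≤ J := by
    rcases hJ with h | h | h | h
    · exact h
    · exact absurd h h1
    · exact absurd h h2
    · exact absurd h h3
  simp only [Dom_select_coding, pvDomInt, Bool.and_eq_true, decide_eq_true_eq] at hDom
  show selLoop delta J 64 1 =
    ((max 8 (PySem.Int.bitLength (PySem.Int.floordiv (max (128*delta+49) 0) J)) : Nat) : Int) - 7
  set T : Int := 128*delta + 49 with hT
  have hJpos : (0:Int) < J := by omega
  set q : Int := PySem.Int.floordiv (max T 0) J with hq
  have hq0 : 0 ≤ q := by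
    rw [hq, PySem.Int.floordiv_eq_ediv_of_pos hJpos]
    exact Int.ediv_nonneg (le_max_right _ _) (by omega)
  set s : Nat := PySem.Int.bitLength q with hs
  -- the loop guard at k is exactly "k + 7 < s"
  have hc : ∀ k : Int, 1 ≤ k → (J * pyPow2 (k+7) ≤ 128*delta + 49 ↔ k + 7 < (s:Int)) := by
    intro k hk
    have he : (k+7).toNat = k.toNat + 7 := by omega
    have hchar : ∀ e : Nat, (J * 2^e > T) ↔ s ≤ e := by
      intro e
      have hp : (0:Int) < 2^e := by positivity
      have h1 : J * 2^e > max T 0 ↔ q < 2^e := by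
        rw [hq, PySem.Int.floordiv_lt_iff_lt_mul hJpos, gt_iff_lt, mul_comm]
      have h2 : J * 2^e > T ↔ J * 2^e > max T 0 := by
        have : (0:Int) < J * 2^e := by positivity
        constructor <;> intro <;> omega
      rw [h2, h1, ← bitLength_le_iff q hq0 e]
    have hkey := hchar (k.toNat + 7)
    simp only [pyPow2, he]
    constructor
    · intro hle
      by_contra hx
      have hgt := hkey.mpr (by omega)
      omega
    · intro hlt
      by_contra hx
      have hs7 : s ≤ k.toNat + 7 := hkey.mp (by omega)
      omega
  -- s is small: q < 2^41
  have hsb : s ≤ 41 := by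
    rw [hs]
    rw [bitLength_le_iff q hq0 41]
    rw [hq, PySem.Int.floordiv_lt_iff_lt_mul hJpos]
    have : (2:Int)^41 * 1 ≤ 2^41 * J := by
      apply mul_le_mul_of_nonneg_left hJ1 (by positivity)
    have h40 : ((2:Int)^41) = 2199023255552 := by norm_num
    omega
  rw [selLoop_eq delta J s hc 64 1 (by omega) (by omega), Nat.cast_max]
  omega
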